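-- pv_equiv track=rewrite | github.com/rainfanlol/YouLiang-repo | Python/development project/HW_info/check_lenovo_sr650_status.py | titlestatus
-- ===== SOURCE A (Python) =====
-- def titlestatus(lis):
--  result = 0
--  for i in range(len(lis)):
--   if (lis[i] == 1 ):
--      result = 1
--      continue
--
--   elif (lis[i] == 2 ):
--      result = 2
--      return result
--      break
--   else:
--      continue
--  return result
-- ===== SOURCE B (Python) =====
-- def titlestatus(lis):
--     if 2 in lis:
--         return 2
--     if 1 in lis:
--         return 1
--     return 0
-- ===== Notes on version B (the rewrite author's own statement) =====
-- stated objective: simpler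
-- what changed: Replaces the accumulating loop with early return on 2 by two ordered membership checks (2 first, then 1).
import Mathlib
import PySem

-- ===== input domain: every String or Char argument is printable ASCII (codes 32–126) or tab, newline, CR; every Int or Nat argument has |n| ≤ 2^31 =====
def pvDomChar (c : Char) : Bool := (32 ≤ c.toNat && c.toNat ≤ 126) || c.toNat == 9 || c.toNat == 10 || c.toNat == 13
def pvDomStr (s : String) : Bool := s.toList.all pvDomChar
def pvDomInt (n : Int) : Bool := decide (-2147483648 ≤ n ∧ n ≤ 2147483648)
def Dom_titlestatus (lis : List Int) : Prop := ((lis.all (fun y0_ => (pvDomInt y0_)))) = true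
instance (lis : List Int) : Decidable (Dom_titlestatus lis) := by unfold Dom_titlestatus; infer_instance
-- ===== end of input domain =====

-- ===== PORT A =====
-- loop over the list carrying `result`; returns 2 immediately when a 2 is seen
def titlestatusLoop (lis : List Int) (result : Int) : Int :=
  match lis with
  | [] => result
  | x :: xs =>
    if x = 1 then titlestatusLoop xs 1
    else if x = 2 then 2
    else titlestatusLoop xs result

def titlestatus (lis : List Int) : Int := titlestatusLoop lis 0

-- ===== PORT B =====
-- B: two ordered membership checks
def titlestatus_alt (lis : List Int) : Int :=
  if lis.contains 2 then 2 else if lis.contains 1 then 1 else 0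

-- ===== PRECONDITION & SPEC =====
def Spec_titlestatus (lis : List Int) (out : Int) : Prop := out = titlestatus_alt lis
instance (lis : List Int) (out : Int) : Decidable (Spec_titlestatus lis out) := by unfold Spec_titlestatus; infer_instance

-- ===== CLAIM (what is proved, stated in full; the proofs are below) =====
def Claim_equal_titlestatus : Prop := ∀ (lis : List Int), Dom_titlestatus lis → Spec_titlestatus lis (titlestatus lis)

-- ===== LEMMAS AND PROOFS =====

-- ===== VERDICT (by name: the statement is the Claim_ definition above) =====
theorem loop_eq (lis : List Int) :
    ∀ r : Int, titlestatusLoop lis r =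
      if lis.contains 2 then 2 else if lis.contains 1 then 1 else r := by
  induction lis with
  | nil => intro r; simp [titlestatusLoop]
  | cons x xs ih =>
    intro r
    simp only [titlestatusLoop, List.contains_cons]
    by_cases h1 : x = 1
    · subst h1
      rw [ih]
      by_cases h2 : (2:Int) ∈ xs <;> simp [h2]
    · by_cases h2 : x = 2
      · subst h2; simp
      · rw [ih r]
        have e1 : ¬ (1:Int) = x := fun h => h1 h.symm
        have e2 : ¬ (2:Int) = x := fun h => h2 h.symm
        simp [h1, h2, e1, e2]

theorem titlestatus_spec : Claim_equal_titlestatus := by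
  intro lis _
  unfold Spec_titlestatus titlestatus titlestatus_alt
  rw [loop_eq]
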